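-- pv_equiv track=rewrite | github.com/srinivaskondisetty/DSAPython | BinarySearch/bitwise_xor.py | xorBeauty
-- ===== SOURCE A (Python) =====
-- def xorBeauty(nums):
--     x_or_list = []
--     for i in range(len(nums)):
--         for j in range(len(nums)):
--             for k in range(len(nums)):
--                 or_value = nums[i] | nums[j]
--                 and_value = or_value & nums[k]
--                 x_or_value = and_value
--                 x_or_list.append(x_or_value)
--
--     result = x_or_list[0]
--
--     for i in range(1, len(x_or_list)):
--         result = result ^ x_or_list[i]
--
--     return result
-- ===== SOURCE B (Python) =====
-- def xorBeauty(nums):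
--     # XOR of (nums[i]|nums[j])&nums[k] over all triples collapses to the XOR
--     # of the elements: symmetric (i,j)/(j,i) OR-terms cancel and AND
--     # distributes over XOR. Single pass, O(n).
--     result = 0
--     for v in nums:
--         result ^= v
--     return result
-- ===== Notes on version B (the rewrite author's own statement) =====
-- stated objective: faster
-- what changed: Replaced the triple nested loop materialising all n^3 OR-AND values and XOR-folding them by a single XOR pass over the elements, using the identity that symmetric (i,j)/(j,i) OR terms cancel under XOR and AND distributes over XOR.
import Mathlib
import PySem

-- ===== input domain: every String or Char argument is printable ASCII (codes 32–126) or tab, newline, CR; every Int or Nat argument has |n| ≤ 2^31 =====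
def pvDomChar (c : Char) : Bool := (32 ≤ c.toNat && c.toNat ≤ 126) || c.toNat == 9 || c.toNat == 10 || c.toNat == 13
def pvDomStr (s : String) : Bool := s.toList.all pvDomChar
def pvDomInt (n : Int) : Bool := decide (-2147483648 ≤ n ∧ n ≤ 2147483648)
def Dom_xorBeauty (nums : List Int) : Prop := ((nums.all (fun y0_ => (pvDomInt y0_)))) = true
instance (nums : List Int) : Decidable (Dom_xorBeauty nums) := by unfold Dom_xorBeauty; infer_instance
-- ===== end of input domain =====

-- B replaces A's O(n^3) triple loop over all OR-AND triples by a single XOR pass over the elements (asymptotically faster; return-value equivalence, no mutation involved).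

-- ===== PORT A =====
-- or_value / and_value / x_or_value are inlined into the appended expression (they are simple lets in A).
def xorBeauty (nums : List Int) : Int :=
  let x_or_list : List Int :=
    (PySem.List.pyRange 0 (PySem.List.len nums) 1).foldl (fun acc i =>
      (PySem.List.pyRange 0 (PySem.List.len nums) 1).foldl (fun acc j =>
        (PySem.List.pyRange 0 (PySem.List.len nums) 1).foldl (fun acc k =>
          acc ++ [PySem.Int.band
                    (PySem.Int.bor (PySem.List.pyGetD nums i 0) (PySem.List.pyGetD nums j 0))
                    (PySem.List.pyGetD nums k 0)]) acc) acc) []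
  -- x_or_list[0]: IndexError on the empty list, excluded by Pre_xorBeauty
  match PySem.List.pyGet? x_or_list 0 with
  | none => 0
  | some result =>
      (PySem.List.pyRange 1 (PySem.List.len x_or_list) 1).foldl
        (fun acc i => PySem.Int.bxor acc (PySem.List.pyGetD x_or_list i 0)) result

-- ===== PORT B =====
def xorBeauty_alt (nums : List Int) : Int :=
  nums.foldl (fun result v => PySem.Int.bxor result v) 0

-- ===== PRECONDITION & SPEC =====
-- Pre_ excludes only the empty list, on which A raises IndexError (x_or_list[0]).
def Pre_xorBeauty (nums : List Int) : Prop := nums ≠ []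
instance (nums : List Int) : Decidable (Pre_xorBeauty nums) := by unfold Pre_xorBeauty; infer_instance
def pvWitness_xorBeauty : List Int := [1, 2, 3]

def Spec_xorBeauty (nums : List Int) (out : Int) : Prop := out = xorBeauty_alt nums
instance (nums : List Int) (out : Int) : Decidable (Spec_xorBeauty nums out) := by unfold Spec_xorBeauty; infer_instance

-- ===== CLAIM (what is proved, stated in full; the proofs are below) =====
def Claim_equal_xorBeauty : Prop := ∀ (nums : List Int), Dom_xorBeauty nums → Pre_xorBeauty nums → Spec_xorBeauty nums (xorBeauty nums)

-- ===== LEMMAS AND PROOFS =====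

-- Nat bit facts
theorem pvLdiffAdd (m n : Nat) : (m &&& n) + m.ldiff n = m := by
  induction m using Nat.binaryRec generalizing n with
  | zero => simp [Nat.ldiff]
  | bit b m ih =>
    conv_lhs => rw [← Nat.bit_bodd_div2 n]
    rw [Nat.land_bit, Nat.ldiff_bit, Nat.bit_val, Nat.bit_val, Nat.bit_val]
    have h := ih n.div2
    cases b <;> cases n.bodd <;> simp <;> omega

theorem pvSubAnd (m n : Nat) : m - (m &&& n) = m.ldiff n := by
  have := pvLdiffAdd m n; omega

-- Int constructor normal forms for the PySem bitwise primitives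
theorem pvHA (m : Nat) : (0 : Int) ≤ Int.ofNat m := Int.natCast_nonneg m
theorem pvHB (m : Nat) : ¬ (0 : Int) ≤ Int.negSucc m := by rw [Int.negSucc_eq]; omega
theorem pvToNat1 (m : Nat) : (Int.ofNat m).toNat = m := rfl
theorem pvToNat2 (m : Nat) : (-(Int.negSucc m) - 1).toNat = m := by
  rw [Int.negSucc_eq]; omega
theorem pvNegSuccForm (x : Nat) : -((x : Nat) : Int) - 1 = Int.negSucc x := by
  rw [Int.negSucc_eq]; ring

theorem pvBxorNN (m n : Nat) : PySem.Int.bxor (Int.ofNat m) (Int.ofNat n) = Int.ofNat (m ^^^ n) := by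
  unfold PySem.Int.bxor
  rw [if_pos (pvHA m), if_pos (pvHA n), pvToNat1, pvToNat1]; rfl
theorem pvBxorNS (m n : Nat) : PySem.Int.bxor (Int.ofNat m) (Int.negSucc n) = Int.negSucc (m ^^^ n) := by
  unfold PySem.Int.bxor
  rw [if_pos (pvHA m), if_neg (pvHB n), pvToNat1, pvToNat2, pvNegSuccForm]
theorem pvBxorSN (m n : Nat) : PySem.Int.bxor (Int.negSucc m) (Int.ofNat n) = Int.negSucc (m ^^^ n) := by
  unfold PySem.Int.bxor
  rw [if_neg (pvHB m), if_pos (pvHA n), pvToNat1, pvToNat2, pvNegSuccForm]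
theorem pvBxorSS (m n : Nat) : PySem.Int.bxor (Int.negSucc m) (Int.negSucc n) = Int.ofNat (m ^^^ n) := by
  unfold PySem.Int.bxor
  rw [if_neg (pvHB m), if_neg (pvHB n), pvToNat2, pvToNat2]; rfl

theorem pvBandNN (m n : Nat) : PySem.Int.band (Int.ofNat m) (Int.ofNat n) = Int.ofNat (m &&& n) := by
  unfold PySem.Int.band
  rw [if_pos (pvHA m), if_pos (pvHA n), pvToNat1, pvToNat1]; rfl
theorem pvBandNS (m n : Nat) : PySem.Int.band (Int.ofNat m) (Int.negSucc n) = Int.ofNat (m.ldiff n) := by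
  unfold PySem.Int.band
  rw [if_pos (pvHA m), if_neg (pvHB n), pvToNat1, pvToNat2, pvSubAnd]; rfl
theorem pvBandSN (m n : Nat) : PySem.Int.band (Int.negSucc m) (Int.ofNat n) = Int.ofNat (n.ldiff m) := by
  unfold PySem.Int.band
  rw [if_neg (pvHB m), if_pos (pvHA n), pvToNat1, pvToNat2, pvSubAnd]; rfl
theorem pvBandSS (m n : Nat) : PySem.Int.band (Int.negSucc m) (Int.negSucc n) = Int.negSucc (m ||| n) := by
  unfold PySem.Int.band
  rw [if_neg (pvHB m), if_neg (pvHB n), pvToNat2, pvToNat2, pvNegSuccForm]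

theorem pvBorNN (m n : Nat) : PySem.Int.bor (Int.ofNat m) (Int.ofNat n) = Int.ofNat (m ||| n) := by
  unfold PySem.Int.bor
  rw [if_pos (pvHA m), if_pos (pvHA n), pvToNat1, pvToNat1]; rfl
theorem pvBorNS (m n : Nat) : PySem.Int.bor (Int.ofNat m) (Int.negSucc n) = Int.negSucc (n.ldiff m) := by
  unfold PySem.Int.bor
  rw [if_pos (pvHA m), if_neg (pvHB n), pvToNat1, pvToNat2, pvSubAnd, pvNegSuccForm]
theorem pvBorSN (m n : Nat) : PySem.Int.bor (Int.negSucc m) (Int.ofNat n) = Int.negSucc (m.ldiff n) := by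
  unfold PySem.Int.bor
  rw [if_neg (pvHB m), if_pos (pvHA n), pvToNat1, pvToNat2, pvSubAnd, pvNegSuccForm]
theorem pvBorSS (m n : Nat) : PySem.Int.bor (Int.negSucc m) (Int.negSucc n) = Int.negSucc (m &&& n) := by
  unfold PySem.Int.bor
  rw [if_neg (pvHB m), if_neg (pvHB n), pvToNat2, pvToNat2, pvNegSuccForm]

theorem pvTBofNat (m : Nat) (k : Nat) : (Int.ofNat m).testBit k = m.testBit k := rfl
theorem pvTBnegSucc (m : Nat) (k : Nat) : (Int.negSucc m).testBit k = !(m.testBit k) := rfl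
theorem pvTBzero (k : Nat) : (0 : Int).testBit k = false := by
  rw [show (0 : Int) = Int.ofNat 0 from rfl, pvTBofNat]; exact Nat.zero_testBit k

-- testBit characterisation of the PySem bitwise primitives
theorem pvTB_bxor (a b : Int) (k : Nat) :
    (PySem.Int.bxor a b).testBit k = xor (a.testBit k) (b.testBit k) := by
  cases a <;> cases b <;>
    simp only [pvBxorNN, pvBxorNS, pvBxorSN, pvBxorSS, pvTBofNat, pvTBnegSucc, Nat.testBit_xor] <;>
    (cases Nat.testBit _ k <;> cases Nat.testBit _ k <;> rfl)
theorem pvTB_band (a b : Int) (k : Nat) :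
    (PySem.Int.band a b).testBit k = ((a.testBit k) && (b.testBit k)) := by
  cases a <;> cases b <;>
    simp only [pvBandNN, pvBandNS, pvBandSN, pvBandSS, pvTBofNat, pvTBnegSucc,
      Nat.testBit_land, Nat.testBit_lor, Nat.testBit_ldiff] <;>
    (cases Nat.testBit _ k <;> cases Nat.testBit _ k <;> rfl)
theorem pvTB_bor (a b : Int) (k : Nat) :
    (PySem.Int.bor a b).testBit k = ((a.testBit k) || (b.testBit k)) := by
  cases a <;> cases b <;>
    simp only [pvBorNN, pvBorNS, pvBorSN, pvBorSS, pvTBofNat, pvTBnegSucc,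
      Nat.testBit_land, Nat.testBit_lor, Nat.testBit_ldiff] <;>
    (cases Nat.testBit _ k <;> cases Nat.testBit _ k <;> rfl)

-- extensionality for Int via testBit
theorem pvIntExt (a b : Int) (h : ∀ k, a.testBit k = b.testBit k) : a = b := by
  have big : ∀ (m n : Nat), m.testBit (m + n + 1) = false := by
    intro m n
    exact Nat.testBit_eq_false_of_lt
      (lt_of_lt_of_le Nat.lt_two_pow_self (Nat.pow_le_pow_right (by norm_num) (by omega)))
  cases a with
  | ofNat m =>
    cases b with
    | ofNat n => exact congrArg Int.ofNat (Nat.eq_of_testBit_eq fun i => h i)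
    | negSucc n =>
      exfalso
      have h1 := h (m + n + 1)
      rw [pvTBnegSucc, pvTBofNat] at h1
      rw [big m n] at h1
      have h2 : n.testBit (m + n + 1) = false := by
        have := big n m; rwa [show n + m + 1 = m + n + 1 by omega] at this
      rw [h2] at h1; simp at h1
  | negSucc m =>
    cases b with
    | ofNat n =>
      exfalso
      have h1 := h (m + n + 1)
      rw [pvTBnegSucc, pvTBofNat] at h1
      have h2 : n.testBit (m + n + 1) = false := by
        have := big n m; rwa [show n + m + 1 = m + n + 1 by omega] at this
      rw [big m n, h2] at h1; simp at h1
    | negSucc n =>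
      refine congrArg Int.negSucc (Nat.eq_of_testBit_eq fun i => ?_)
      have h1 := h i
      rw [pvTBnegSucc, pvTBnegSucc] at h1
      exact Bool.not_inj h1

-- bitwise algebra on Int
theorem pvBxorAssoc (a b c : Int) :
    PySem.Int.bxor (PySem.Int.bxor a b) c = PySem.Int.bxor a (PySem.Int.bxor b c) :=
  pvIntExt _ _ fun k => by simp [pvTB_bxor]
theorem pvBxorLeftComm (a b c : Int) :
    PySem.Int.bxor a (PySem.Int.bxor b c) = PySem.Int.bxor b (PySem.Int.bxor a c) := by
  rw [← pvBxorAssoc, PySem.Int.bxor_comm a b, pvBxorAssoc]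
theorem pvZeroBxor (a : Int) : PySem.Int.bxor 0 a = a := by
  rw [PySem.Int.bxor_comm]; exact PySem.Int.bxor_zero a
theorem pvBandBxorRight (a b c : Int) :
    PySem.Int.band (PySem.Int.bxor a b) c = PySem.Int.bxor (PySem.Int.band a c) (PySem.Int.band b c) :=
  pvIntExt _ _ fun k => by
    simp only [pvTB_band, pvTB_bxor]
    cases a.testBit k <;> cases b.testBit k <;> cases c.testBit k <;> rfl
theorem pvBandBxorLeft (a b c : Int) :
    PySem.Int.band c (PySem.Int.bxor a b) = PySem.Int.bxor (PySem.Int.band c a) (PySem.Int.band c b) := by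
  rw [PySem.Int.band_comm c, pvBandBxorRight, PySem.Int.band_comm a, PySem.Int.band_comm b]
theorem pvBorSelf (a : Int) : PySem.Int.bor a a = a :=
  pvIntExt _ _ fun k => by simp [pvTB_bor]
theorem pvBandSelf (a : Int) : PySem.Int.band a a = a :=
  PySem.Int.band_self a
theorem pvZeroBand (c : Int) : PySem.Int.band 0 c = 0 :=
  pvIntExt _ _ fun k => by simp [pvTB_band, pvTBzero]

-- XOR folds
def pvXorL (l : List Int) : Int := l.foldl PySem.Int.bxor 0

theorem pvFoldlBxor (l : List Int) (a : Int) :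
    l.foldl PySem.Int.bxor a = PySem.Int.bxor a (pvXorL l) := by
  induction l generalizing a with
  | nil => simp [pvXorL, PySem.Int.bxor_zero]
  | cons x t ih =>
    simp only [pvXorL, List.foldl_cons]
    rw [ih (PySem.Int.bxor a x), ih (PySem.Int.bxor 0 x), pvZeroBxor, pvBxorAssoc]

theorem pvXorLCons (x : Int) (t : List Int) : pvXorL (x :: t) = PySem.Int.bxor x (pvXorL t) := by
  simp only [pvXorL, List.foldl_cons]
  rw [pvFoldlBxor t (PySem.Int.bxor 0 x), pvZeroBxor]
  rfl

theorem pvXorLAppend (l1 l2 : List Int) :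
    pvXorL (l1 ++ l2) = PySem.Int.bxor (pvXorL l1) (pvXorL l2) := by
  simp only [pvXorL, List.foldl_append]
  exact pvFoldlBxor l2 _

theorem pvXorLFlatMap {α : Type} (g : α → List Int) (l : List α) :
    pvXorL (l.flatMap g) = pvXorL (l.map (fun x => pvXorL (g x))) := by
  induction l with
  | nil => rfl
  | cons x t ih =>
    rw [List.flatMap_cons, pvXorLAppend, List.map_cons, pvXorLCons, ih]

theorem pvXorLMapBxor {α : Type} (f g : α → Int) (l : List α) :
    pvXorL (l.map (fun x => PySem.Int.bxor (f x) (g x)))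
      = PySem.Int.bxor (pvXorL (l.map f)) (pvXorL (l.map g)) := by
  induction l with
  | nil => simp [pvXorL]
  | cons x t ih =>
    simp only [List.map_cons, pvXorLCons, ih]
    rw [pvBxorAssoc, pvBxorAssoc]
    congr 1
    rw [pvBxorLeftComm]

theorem pvXorLMapBandLeft {α : Type} (c : Int) (f : α → Int) (l : List α) :
    pvXorL (l.map (fun x => PySem.Int.band c (f x))) = PySem.Int.band c (pvXorL (l.map f)) := by
  induction l with
  | nil => simp [pvXorL, PySem.Int.band_zero]
  | cons x t ih =>
    simp only [List.map_cons, pvXorLCons, ih, pvBandBxorLeft]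

theorem pvXorLMapBandRight {α : Type} (c : Int) (f : α → Int) (l : List α) :
    pvXorL (l.map (fun x => PySem.Int.band (f x) c)) = PySem.Int.band (pvXorL (l.map f)) c := by
  induction l with
  | nil => simp [pvXorL, pvZeroBand]
  | cons x t ih =>
    simp only [List.map_cons, pvXorLCons, ih, pvBandBxorRight]

-- XOR over all (x, y) pairs of (x | y) collapses to the XOR of the list
theorem pvPair (l : List Int) :
    pvXorL (l.map (fun x => pvXorL (l.map (fun y => PySem.Int.bor x y)))) = pvXorL l := by
  induction l with
  | nil => rfl
  | cons a t ih =>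
    simp only [List.map_cons, pvXorLCons, pvBorSelf]
    rw [pvXorLMapBxor (fun x => PySem.Int.bor x a) (fun x => pvXorL (t.map (fun y => PySem.Int.bor x y))) t]
    have hsym : pvXorL (t.map (fun x => PySem.Int.bor x a)) = pvXorL (t.map (fun y => PySem.Int.bor a y)) := by
      congr 1
      exact List.map_congr_left fun y _ => PySem.Int.bor_comm y a
    rw [hsym, ih]
    rw [pvBxorAssoc, ← pvBxorAssoc (pvXorL (t.map (fun y => PySem.Int.bor a y)))]
    rw [PySem.Int.bxor_self, pvZeroBxor]

-- B's fold is pvXorL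
theorem pvAltEq (nums : List Int) : xorBeauty_alt nums = pvXorL nums := rfl

-- the value of the whole XOR-of-triples
theorem pvTriple (nums : List Int) :
    pvXorL (nums.flatMap (fun x => nums.flatMap (fun y =>
        nums.map (fun z => PySem.Int.band (PySem.Int.bor x y) z)))) = pvXorL nums := by
  rw [pvXorLFlatMap]
  have inner : ∀ x : Int,
      pvXorL (nums.flatMap (fun y => nums.map (fun z => PySem.Int.band (PySem.Int.bor x y) z)))
        = PySem.Int.band (pvXorL (nums.map (fun y => PySem.Int.bor x y))) (pvXorL nums) := by
    intro x
    rw [pvXorLFlatMap]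
    have h1 : ∀ y : Int,
        pvXorL (nums.map (fun z => PySem.Int.band (PySem.Int.bor x y) z))
          = PySem.Int.band (PySem.Int.bor x y) (pvXorL nums) := by
      intro y
      have := pvXorLMapBandLeft (PySem.Int.bor x y) (fun z => z) nums
      simpa using this
    rw [List.map_congr_left (fun y _ => h1 y)]
    exact pvXorLMapBandRight (pvXorL nums) (fun y => PySem.Int.bor x y) nums
  rw [List.map_congr_left (fun x _ => inner x)]
  rw [pvXorLMapBandRight (pvXorL nums) (fun x => pvXorL (nums.map (fun y => PySem.Int.bor x y))) nums]
  rw [pvPair, pvBandSelf]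

-- index form of the triple comprehension = element form
theorem pvIndexToElem (nums : List Int) :
    (PySem.List.pyRange 0 (PySem.List.len nums) 1).flatMap (fun i =>
      (PySem.List.pyRange 0 (PySem.List.len nums) 1).flatMap (fun j =>
        (PySem.List.pyRange 0 (PySem.List.len nums) 1).map (fun k =>
          PySem.Int.band
            (PySem.Int.bor (PySem.List.pyGetD nums i 0) (PySem.List.pyGetD nums j 0))
            (PySem.List.pyGetD nums k 0))))
    = nums.flatMap (fun x => nums.flatMap (fun y =>
        nums.map (fun z => PySem.Int.band (PySem.Int.bor x y) z))) := by
  conv_rhs => rw [← PySem.List.map_pyGetD_pyRange_zero nums 0]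
  simp only [List.flatMap_map, List.map_map, Function.comp_def]

-- ===== VERDICT (by name: the statement is the Claim_ definition above) =====
theorem xorBeauty_spec : Claim_equal_xorBeauty := by
  intro nums _hdom hpre
  unfold Spec_xorBeauty xorBeauty
  rw [pvAltEq]
  simp only [PySem.List.foldl_append_singleton_eq_map, PySem.List.foldl_append_eq_flatMap,
    List.nil_append]
  rw [pvIndexToElem]
  have hLne : nums.flatMap (fun x => nums.flatMap (fun y =>
      nums.map (fun z => PySem.Int.band (PySem.Int.bor x y) z))) ≠ [] := by
    obtain ⟨x, t, hx⟩ := List.exists_cons_of_ne_nil hpre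
    subst hx
    simp
  obtain ⟨l0, rest, hL⟩ := List.exists_cons_of_ne_nil hLne
  rw [hL]
  have hget : PySem.List.pyGet? (l0 :: rest) (0 : Int) = some l0 := by
    simp [PySem.List.pyGet?, PySem.List.pyIdx?]
  rw [hget]
  dsimp only
  rw [PySem.List.foldl_pyRange_pyGetD (l0 :: rest) 0 PySem.Int.bxor l0 (by norm_num)]
  simp only [Int.toNat_one, List.drop_succ_cons, List.drop_zero]
  rw [pvFoldlBxor rest l0, ← pvXorLCons, ← hL, pvTriple]
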